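-- pv_equiv track=rewrite | github.com/obenno/Soybean_salinity_ONT_DRS | alternative_splicing/extract_AS_events.py | group_events
-- ===== SOURCE A (Python) =====
-- def compare_events(eventType,
--                    event_A, event_B):
--     ## event_A and event_B is a list of
--     ## event informaiont.
--     ## e.g.:
--     ## A: [InclusionStart, InclusionEnd,
--     ##     ExclusionStart, ExclusionEnd,
--     ##     InclusionTrans, ExclusionTrnas]
--     ## It is the value of events_dic
--     A_inclusionStart = int(event_A[0])
--     A_inclusionEnd = int(event_A[1])
--     A_exclusionStart = int(event_A[2])
--     A_exclusionEnd = int(event_A[3])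
--     B_inclusionStart = int(event_B[0])
--     B_inclusionEnd = int(event_B[1])
--     B_exclusionStart = int(event_B[2])
--     B_exclusionEnd = int(event_B[3])
--
--     if eventType == "ATSS":
--         if(abs(B_inclusionStart - A_inclusionStart)<=10 and
--            abs(B_exclusionStart - A_exclusionStart)<=10):
--             ## merge
--             return True
--         else:
--             return False
--     elif eventType == "SE":
--         if(B_inclusionStart == A_inclusionStart and
--            B_inclusionEnd == A_inclusionEnd and
--            abs(B_exclusionStart - A_exclusionStart)<=10 and
--            abs(B_exclusionEnd - A_exclusionEnd)<=10):
--             # merge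
--             return True
--         else:
--             return False
--     elif eventType == "RI":
--         if(abs(B_exclusionStart - A_exclusionStart)<=10 and
--            abs(B_exclusionEnd - A_exclusionEnd)<=10):
--             # merge
--             return True
--         else:
--             return False
--     else:
--         return False
--
-- def group_events(eventType, eventList):
--     ## This function return grouping formation
--     ## index of events will be grouped into list
--     ## returned groups will be:
--     ## e.g. [[0],[1,2],[3]]
--     groups = []
--     for i, event_B in enumerate(eventList):
--         found_group = False
--         for group in groups:
--             for j in group:
--                 event_A = eventList[j]
--                 compare_result = compare_events(eventType,
--                                                 event_A, event_B)
--                 if compare_result: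
--                     group.append(i)
--                     found_group = True
--                     break
--             ## Only assign to one group
--             if found_group:
--                 break
--         if not found_group:
--             groups.append([i])
--     return groups
-- ===== SOURCE B (Python) =====
-- # Label-array reformulation: assign each event the minimum group id among
-- # matching earlier events (new id if none), then bucket indices by id.
-- _SPEC = {
--     "ATSS": [(0, True), (2, True)],
--     "SE":   [(0, False), (1, False), (2, True), (3, True)],
--     "RI":   [(2, True), (3, True)],
-- }
--
-- def _match(eventType, a, b):
--     spec = _SPEC.get(eventType)
--     if spec is None:
--         return False
--     return all(abs(b[k] - a[k]) <= 10 if fuzzy else b[k] == a[k]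
--                for k, fuzzy in spec)
--
-- def group_events(eventType, eventList):
--     labels = []
--     ngroups = 0
--     for ev in eventList:
--         cands = [g for j, g in enumerate(labels)
--                  if _match(eventType, eventList[j], ev)]
--         if cands:
--             labels.append(min(cands))
--         else:
--             labels.append(ngroups)
--             ngroups += 1
--     return [[i for i, g in enumerate(labels) if g == gid]
--             for gid in range(ngroups)]
-- ===== Notes on version B (the rewrite author's own statement) =====
-- stated objective: alternative
-- what changed: Replaces A's nested scan over a mutable list-of-groups (two loops with break, in-place append) by a flat label array: each event gets the minimum group id among matching earlier events (or a fresh id), and the groups are rebuilt at the end by bucketing indices by id; the fuzzy/exact coordinate comparison is table-driven instead of an if/elif chain.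
import Mathlib
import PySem

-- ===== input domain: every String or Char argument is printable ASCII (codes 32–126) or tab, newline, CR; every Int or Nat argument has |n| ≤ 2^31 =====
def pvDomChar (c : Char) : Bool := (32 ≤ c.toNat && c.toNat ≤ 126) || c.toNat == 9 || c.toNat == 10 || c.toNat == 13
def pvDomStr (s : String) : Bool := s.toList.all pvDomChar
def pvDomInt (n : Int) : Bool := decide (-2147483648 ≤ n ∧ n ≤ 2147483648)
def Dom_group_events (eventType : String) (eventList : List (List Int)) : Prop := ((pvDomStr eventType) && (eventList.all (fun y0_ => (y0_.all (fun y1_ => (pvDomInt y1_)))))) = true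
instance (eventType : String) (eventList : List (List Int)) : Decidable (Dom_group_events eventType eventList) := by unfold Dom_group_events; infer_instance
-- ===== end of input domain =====

-- B replaces A's nested scan over mutable groups by a label array (minimum matching group id per event) plus a final bucketing pass; same return value, proved on Pre_.


-- ===== PORT A =====
-- int(event[k]) is event[k] here (entries are Int); pyGetD … 0 stands for the raising
-- indexing event[k] — exact under Pre_ (all accessed events have ≥ 4 entries).
def compare_events (eventType : String) (event_A event_B : List Int) : Bool :=
  let aIS := PySem.List.pyGetD event_A 0 0
  let aIE := PySem.List.pyGetD event_A 1 0
  let aES := PySem.List.pyGetD event_A 2 0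
  let aEE := PySem.List.pyGetD event_A 3 0
  let bIS := PySem.List.pyGetD event_B 0 0
  let bIE := PySem.List.pyGetD event_B 1 0
  let bES := PySem.List.pyGetD event_B 2 0
  let bEE := PySem.List.pyGetD event_B 3 0
  if eventType == "ATSS" then
    decide ((bIS - aIS).natAbs ≤ 10) && decide ((bES - aES).natAbs ≤ 10)
  else if eventType == "SE" then
    (bIS == aIS) && (bIE == aIE) &&
      decide ((bES - aES).natAbs ≤ 10) && decide ((bEE - aEE).natAbs ≤ 10)
  else if eventType == "RI" then
    decide ((bES - aES).natAbs ≤ 10) && decide ((bEE - aEE).natAbs ≤ 10)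
  else false

-- A's two inner loops with their breaks: the first group containing a matching
-- member gets i appended (in place in Python, rebuilt here); none = no group found.
def findGroup (eventType : String) (eventList : List (List Int)) (event_B : List Int)
    (i : Int) : List (List Int) → Option (List (List Int))
  | [] => none
  | g :: gs =>
    if g.any (fun j => compare_events eventType (PySem.List.pyGetD eventList j []) event_B) then
      some ((g ++ [i]) :: gs)
    else
      (findGroup eventType eventList event_B i gs).map (g :: ·)

def group_events (eventType : String) (eventList : List (List Int)) : List (List Int) :=
  (PySem.List.enumerate eventList 0).foldl
    (fun groups p =>
      match findGroup eventType eventList p.2 p.1 groups with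
      | some gs => gs
      | none => groups ++ [[p.1]])
    []

-- ===== PORT B =====
def matchSpec (eventType : String) : Option (List (Int × Bool)) :=
  if eventType == "ATSS" then some [(0, true), (2, true)]
  else if eventType == "SE" then some [(0, false), (1, false), (2, true), (3, true)]
  else if eventType == "RI" then some [(2, true), (3, true)]
  else none

def matchEv (eventType : String) (a b : List Int) : Bool :=
  match matchSpec eventType with
  | none => false
  | some spec => spec.all (fun p =>
      if p.2 then decide ((PySem.List.pyGetD b p.1 0 - PySem.List.pyGetD a p.1 0).natAbs ≤ 10)
      else PySem.List.pyGetD b p.1 0 == PySem.List.pyGetD a p.1 0)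

def group_events_alt (eventType : String) (eventList : List (List Int)) : List (List Int) :=
  let st := eventList.foldl
    (fun (st : List Int × Int) ev =>
      let cands := (PySem.List.enumerate st.1 0).filterMap
        (fun p => if matchEv eventType (PySem.List.pyGetD eventList p.1 []) ev
                  then some p.2 else none)
      match PySem.List.min? cands (fun x => x) with
      | some m => (st.1 ++ [m], st.2)
      | none => (st.1 ++ [st.2], st.2 + 1))
    ([], 0)
  (PySem.List.pyRange 0 st.2 1).map (fun g =>
    (PySem.List.enumerate st.1 0).filterMap (fun p => if p.2 == g then some p.1 else none))

-- ===== PRECONDITION & SPEC =====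
-- A raises IndexError exactly when the list has ≥ 2 events and some event has fewer
-- than 4 coordinates (every event is then compared at least once); those inputs are
-- excluded, nothing else is.
def Pre_group_events (eventType : String) (eventList : List (List Int)) : Prop :=
  eventList.length ≤ 1 ∨ ∀ e ∈ eventList, 4 ≤ e.length
instance (eventType : String) (eventList : List (List Int)) : Decidable (Pre_group_events eventType eventList) := by unfold Pre_group_events; infer_instance
def pvWitness_group_events : String × List (List Int) := ("ATSS", [[1, 2, 3, 4], [5, 6, 30, 40]])
def Spec_group_events (eventType : String) (eventList : List (List Int)) (out : List (List Int)) : Prop := out = group_events_alt eventType eventList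
instance (eventType : String) (eventList : List (List Int)) (out : List (List Int)) : Decidable (Spec_group_events eventType eventList out) := by unfold Spec_group_events; infer_instance

-- ===== CLAIM (what is proved, stated in full; the proofs are below) =====
def Claim_equal_group_events : Prop := ∀ (eventType : String) (eventList : List (List Int)), Dom_group_events eventType eventList → Pre_group_events eventType eventList → Spec_group_events eventType eventList (group_events eventType eventList)

-- ===== LEMMAS AND PROOFS =====

-- the two comparison functions agree on every pair of events
theorem cmp_eq (t : String) (a b : List Int) : compare_events t a b = matchEv t a b := by
  unfold compare_events matchEv matchSpec
  split_ifs <;> simp [List.all, Bool.and_assoc]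

-- one bucket of indices, exactly as B's final pass builds it
def bucket (L : List Int) (g : Int) : List Int :=
  (PySem.List.enumerate L 0).filterMap (fun p => if p.2 == g then some p.1 else none)

def buckets (L : List Int) (ng : Int) : List (List Int) :=
  (PySem.List.pyRange 0 ng 1).map (bucket L)

-- the two fold bodies, named for the proofs (definitionally the ports' lambdas)
def stepA (t : String) (evl : List (List Int)) (groups : List (List Int))
    (p : Int × List Int) : List (List Int) :=
  match findGroup t evl p.2 p.1 groups with
  | some gs => gs
  | none => groups ++ [[p.1]]

def stepB (t : String) (evl : List (List Int)) (st : List Int × Int)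
    (ev : List Int) : List Int × Int :=
  let cands := (PySem.List.enumerate st.1 0).filterMap
    (fun p => if matchEv t (PySem.List.pyGetD evl p.1 []) ev then some p.2 else none)
  match PySem.List.min? cands (fun x => x) with
  | some m => (st.1 ++ [m], st.2)
  | none => (st.1 ++ [st.2], st.2 + 1)

theorem group_events_eq (t : String) (evl : List (List Int)) :
    group_events t evl = (PySem.List.enumerate evl 0).foldl (stepA t evl) [] := rfl

theorem group_events_alt_eq (t : String) (evl : List (List Int)) :
    group_events_alt t evl =
      buckets (evl.foldl (stepB t evl) ([], 0)).1 (evl.foldl (stepB t evl) ([], 0)).2 := rfl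

theorem mem_bucket (L : List Int) (g j : Int) :
    j ∈ bucket L g ↔ ∃ k : Nat, ∃ _ : k < L.length, j = (k : Int) ∧ L[k] = g := by
  unfold bucket
  simp only [List.mem_filterMap, PySem.List.mem_enumerate_iff]
  constructor
  · rintro ⟨p, ⟨k, hk, rfl⟩, hif⟩
    simp only [zero_add] at hif
    by_cases h : L[k] = g
    · simp [h] at hif; exact ⟨k, hk, hif.symm, h⟩
    · simp [h] at hif
  · rintro ⟨k, hk, rfl, hg⟩
    exact ⟨(0 + (k : Int), L[k]), ⟨k, hk, rfl⟩, by simp [hg]⟩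

theorem mem_cands (t : String) (evl : List (List Int)) (ev : List Int) (L : List Int) (c : Int) :
    c ∈ (PySem.List.enumerate L 0).filterMap
          (fun p => if matchEv t (PySem.List.pyGetD evl p.1 []) ev then some p.2 else none)
      ↔ ∃ k : Nat, ∃ _ : k < L.length,
          matchEv t (PySem.List.pyGetD evl (k : Int) []) ev = true ∧ L[k] = c := by
  simp only [List.mem_filterMap, PySem.List.mem_enumerate_iff]
  constructor
  · rintro ⟨p, ⟨k, hk, rfl⟩, hif⟩
    simp only [zero_add] at hif
    by_cases h : matchEv t (PySem.List.pyGetD evl (k : Int) []) ev = true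
    · rw [if_pos h] at hif
      exact ⟨k, hk, h, Option.some.inj hif⟩
    · rw [if_neg h] at hif; cases hif
  · rintro ⟨k, hk, hm, rfl⟩
    exact ⟨(0 + (k : Int), L[k]), ⟨k, hk, rfl⟩, by rw [zero_add, if_pos hm]⟩

theorem bucket_append (L : List Int) (x g : Int) :
    bucket (L ++ [x]) g = bucket L g ++ (if x == g then [(L.length : Int)] else []) := by
  unfold bucket
  rw [PySem.List.enumerate_append, List.filterMap_append]
  congr 1
  simp [PySem.List.enumerate_cons]
  split_ifs <;> simp_all

theorem bucket_nil_of_lt (L : List Int) (ng : Int) (hL : ∀ l ∈ L, 0 ≤ l ∧ l < ng) :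
    bucket L ng = [] := by
  rw [List.eq_nil_iff_forall_not_mem]
  intro j hj
  rw [mem_bucket] at hj
  obtain ⟨k, hk, _, hg⟩ := hj
  have := hL L[k] (L.getElem_mem hk)
  omega

theorem findGroup_none (t : String) (evl : List (List Int)) (ev : List Int) (i : Int)
    (gs : List (List Int))
    (h : ∀ g ∈ gs, g.any (fun j => compare_events t (PySem.List.pyGetD evl j []) ev) = false) :
    findGroup t evl ev i gs = none := by
  induction gs with
  | nil => rfl
  | cons g gs ih =>
    simp only [findGroup, h g (by simp), ih (fun g' hg' => h g' (by simp [hg'])),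
      Bool.false_eq_true, if_false, Option.map_none]

theorem findGroup_append (t : String) (evl : List (List Int)) (ev : List Int) (i : Int)
    (gs₁ : List (List Int)) (g : List Int) (gs₂ : List (List Int))
    (h1 : ∀ g' ∈ gs₁, g'.any (fun j => compare_events t (PySem.List.pyGetD evl j []) ev) = false)
    (h2 : g.any (fun j => compare_events t (PySem.List.pyGetD evl j []) ev) = true) :
    findGroup t evl ev i (gs₁ ++ g :: gs₂) = some (gs₁ ++ (g ++ [i]) :: gs₂) := by
  induction gs₁ with
  | nil => simp [findGroup, h2]
  | cons a as ih =>
    simp only [List.cons_append, findGroup, h1 a (by simp), Bool.false_eq_true, if_false,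
      ih (fun g' hg' => h1 g' (by simp [hg'])), Option.map_some, List.cons_append]

-- main invariant induction: A's fold over the remaining events, started from the
-- buckets of B's label state, ends in the buckets of B's final state
theorem fold_eq (t : String) (evl : List (List Int)) (rest : List (List Int))
    (L : List Int) (ng : Int) (hng : 0 ≤ ng) (hL : ∀ l ∈ L, 0 ≤ l ∧ l < ng) :
    (PySem.List.enumerate rest (L.length : Int)).foldl (stepA t evl) (buckets L ng)
      = buckets (rest.foldl (stepB t evl) (L, ng)).1 (rest.foldl (stepB t evl) (L, ng)).2 := by
  induction rest generalizing L ng with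
  | nil => simp [PySem.List.enumerate]
  | cons ev rest ih =>
    rw [PySem.List.enumerate_cons, List.foldl_cons, List.foldl_cons]
    have hstep : stepA t evl (buckets L ng) ((L.length : Int), ev)
        = buckets (stepB t evl (L, ng) ev).1 (stepB t evl (L, ng) ev).2 ∧
        (stepB t evl (L, ng) ev).1.length = L.length + 1 ∧
        0 ≤ (stepB t evl (L, ng) ev).2 ∧
        (∀ l ∈ (stepB t evl (L, ng) ev).1, 0 ≤ l ∧ l < (stepB t evl (L, ng) ev).2) := by
      rcases hmin : PySem.List.min? ((PySem.List.enumerate L 0).filterMap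
          (fun p => if matchEv t (PySem.List.pyGetD evl p.1 []) ev then some p.2 else none))
          (fun x => x) with _ | m
      · -- no candidate: a fresh group is opened
        have hB : stepB t evl (L, ng) ev = (L ++ [ng], ng + 1) := by
          unfold stepB; simp only [hmin]
        rw [PySem.List.min?_eq_none_iff] at hmin
        have hnone : findGroup t evl ev (L.length : Int) (buckets L ng) = none := by
          apply findGroup_none
          intro g hg
          rw [buckets, List.mem_map] at hg
          obtain ⟨g0, _, rfl⟩ := hg
          rw [List.any_eq_false]
          rintro j hj hP
          rw [mem_bucket] at hj
          obtain ⟨k, hk, rfl, hg0⟩ := hj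
          rw [cmp_eq] at hP
          have : g0 ∈ ((PySem.List.enumerate L 0).filterMap
              (fun p => if matchEv t (PySem.List.pyGetD evl p.1 []) ev then some p.2 else none)) := by
            rw [mem_cands]; exact ⟨k, hk, hP, hg0⟩
          simp [hmin] at this
        rw [hB]
        refine ⟨?_, by simp, by omega, ?_⟩
        · unfold stepA
          simp only [hnone]
          unfold buckets
          rw [PySem.List.pyRange_one_succ_right hng, List.map_append, List.map_cons, List.map_nil]
          congr 1
          · apply List.map_congr_left
            intro g hg
            rw [PySem.List.mem_pyRange_one] at hg
            rw [bucket_append]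
            have : (ng == g) = false := by rw [beq_eq_false_iff_ne]; omega
            simp [this]
          · rw [bucket_append, bucket_nil_of_lt L ng hL]
            simp
        · intro l hl
          rw [List.mem_append] at hl
          rcases hl with hl | hl
          · have := hL l hl; omega
          · simp at hl; omega
      · -- candidate found: i joins the group with the minimum matching label
        have hB : stepB t evl (L, ng) ev = (L ++ [m], ng) := by
          unfold stepB; simp only [hmin]
        have hmem := PySem.List.min?_mem hmin
        have hisMin := PySem.List.min?_isMin hmin
        rw [mem_cands] at hmem
        obtain ⟨k0, hk0, hm0, hg0⟩ := hmem
        have hmb : 0 ≤ m ∧ m < ng :=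
          hL m (by rw [← hg0]; exact List.getElem_mem hk0)
        have hcons : PySem.List.pyRange m ng 1 = m :: PySem.List.pyRange (m + 1) ng 1 :=
          PySem.List.pyRange_one_cons (by omega)
        have hsplit : PySem.List.pyRange 0 ng 1
            = PySem.List.pyRange 0 m 1 ++ m :: PySem.List.pyRange (m + 1) ng 1 := by
          rw [PySem.List.pyRange_one_append 0 m ng (by omega) (by omega), hcons]
        have hfg : findGroup t evl ev (L.length : Int) (buckets L ng)
            = some ((PySem.List.pyRange 0 m 1).map (bucket L)
                ++ (bucket L m ++ [(L.length : Int)])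
                  :: (PySem.List.pyRange (m + 1) ng 1).map (bucket L)) := by
          rw [buckets, hsplit, List.map_append, List.map_cons]
          apply findGroup_append
          · intro g' hg'
            rw [List.mem_map] at hg'
            obtain ⟨g0, hg0r, rfl⟩ := hg'
            rw [PySem.List.mem_pyRange_one] at hg0r
            rw [List.any_eq_false]
            rintro j hj hP
            rw [mem_bucket] at hj
            obtain ⟨k, hk, rfl, hgk⟩ := hj
            rw [cmp_eq] at hP
            have hc : g0 ∈ ((PySem.List.enumerate L 0).filterMap
                (fun p => if matchEv t (PySem.List.pyGetD evl p.1 []) ev then some p.2 else none)) := by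
              rw [mem_cands]; exact ⟨k, hk, hP, hgk⟩
            have := hisMin g0 hc
            simp at this; omega
          · rw [List.any_eq_true]
            refine ⟨(k0 : Int), ?_, by rw [cmp_eq]; exact hm0⟩
            rw [mem_bucket]; exact ⟨k0, hk0, rfl, hg0⟩
        rw [hB]
        refine ⟨?_, by simp, by omega, ?_⟩
        · unfold stepA
          simp only [hfg]
          unfold buckets
          rw [hsplit, List.map_append, List.map_cons]
          congr 1
          · apply List.map_congr_left
            intro g hg
            rw [PySem.List.mem_pyRange_one] at hg
            rw [bucket_append]
            have : (m == g) = false := by rw [beq_eq_false_iff_ne]; omega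
            simp [this]
          · congr 1
            · rw [bucket_append]; simp
            · apply List.map_congr_left
              intro g hg
              rw [PySem.List.mem_pyRange_one] at hg
              rw [bucket_append]
              have : (m == g) = false := by rw [beq_eq_false_iff_ne]; omega
              simp [this]
        · intro l hl
          rw [List.mem_append] at hl
          rcases hl with hl | hl
          · exact hL l hl
          · simp at hl; omega
    obtain ⟨h1, h2, h3, h4⟩ := hstep
    rw [h1]
    have hcast : (L.length : Int) + 1 = ((stepB t evl (L, ng) ev).1.length : Int) := by
      rw [h2]; push_cast; ring
    rw [hcast]
    exact ih (stepB t evl (L, ng) ev).1 (stepB t evl (L, ng) ev).2 h3 h4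

-- ===== VERDICT (by name: the statement is the Claim_ definition above) =====
theorem group_events_spec : Claim_equal_group_events := by
  intro t evl _ _
  show group_events t evl = group_events_alt t evl
  rw [group_events_eq, group_events_alt_eq]
  have h := fold_eq t evl evl [] 0 le_rfl (by simp)
  simpa [buckets, PySem.List.pyRange_one_eq_nil] using h
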